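-- pv_equiv track=rewrite | github.com/galen1lyons/speechtosummary | archives/whisper_comparison_framework/optimal_whisper_test.py | count_hallucinations
-- ===== SOURCE A (Python) =====
-- def count_hallucinations(text: str) -> int:
--     """
--     Count potential hallucinations by detecting repetitive patterns.
--
--     Strategy:
--     - Split into words
--     - Look for consecutive repeated words (> 5 repetitions)
--     - Count total repetitions
--     """
--     words = text.lower().split()
--
--     if not words:
--         return 0
--
--     hallucination_count = 0
--     i = 0
--
--     while i < len(words):
--         current_word = words[i]
--         repeat_count = 1
--
--         # Count consecutive repetitions
--         j = i + 1
--         while j < len(words) and words[j] == current_word: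
--             repeat_count += 1
--             j += 1
--
--         # If repeated > 5 times, count as hallucination
--         if repeat_count > 5:
--             hallucination_count += repeat_count - 5  # Only count excess
--
--         i = j if repeat_count > 1 else i + 1
--
--     return hallucination_count
-- ===== SOURCE B (Python) =====
-- def count_hallucinations(text: str) -> int:
--     total = 0
--     run = 0
--     prev = None
--     for w in text.lower().split():
--         run = run + 1 if w == prev else 1
--         if run > 5:
--             total += 1
--         prev = w
--     return total
-- ===== Notes on version B (the rewrite author's own statement) =====
-- stated objective: simpler
-- what changed: Replaced the nested while loops with explicit index arithmetic by a single flat pass that tracks the previous word and current run length, adding 1 for each word beyond the 5th of a run.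
import Mathlib
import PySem

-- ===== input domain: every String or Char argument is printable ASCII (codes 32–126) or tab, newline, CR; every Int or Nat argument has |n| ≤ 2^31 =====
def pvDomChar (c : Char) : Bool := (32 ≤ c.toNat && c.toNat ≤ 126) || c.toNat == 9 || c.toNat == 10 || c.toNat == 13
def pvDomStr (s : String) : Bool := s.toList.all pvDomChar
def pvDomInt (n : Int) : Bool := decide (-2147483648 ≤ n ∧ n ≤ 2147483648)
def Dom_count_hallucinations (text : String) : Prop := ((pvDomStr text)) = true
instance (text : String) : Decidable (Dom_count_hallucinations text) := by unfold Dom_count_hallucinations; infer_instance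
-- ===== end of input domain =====

-- B replaces A's nested while loops (inner scan per run, index jumps) by one flat pass
-- tracking the previous word and the current run length; same O(n) cost, simpler code.

-- ===== PORT A =====
-- inner while loop of A: length of the leading run of `w` in `rest`
def pvRunLen (w : String) : List String → Nat
  | [] => 0
  | x :: xs => if x == w then pvRunLen w xs + 1 else 0

-- outer while loop of A: repeat_count = 1 + run, add excess, jump i to j (= i + repeat_count)
def pvALoop : List String → Int
  | [] => 0
  | w :: rest =>
    let k := pvRunLen w rest
    (if 1 + k > 5 then ((1 + k : Nat) : Int) - 5 else 0) + pvALoop (rest.drop k)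
termination_by l => l.length
decreasing_by simp

def count_hallucinations (text : String) : Int :=
  let words := PySem.Str.split₀ (PySem.Str.lower text)
  if words = [] then 0 else pvALoop words

-- ===== PORT B =====
-- B's single for-loop: state (prev, run, total)
def pvBLoop : List String → Option String → Nat → Int → Int
  | [], _, _, total => total
  | w :: ws, prev, run, total =>
    let run' := if some w = prev then run + 1 else 1
    let total' := if run' > 5 then total + 1 else total
    pvBLoop ws (some w) run' total'

def count_hallucinations_alt (text : String) : Int :=
  pvBLoop (PySem.Str.split₀ (PySem.Str.lower text)) none 0 0

-- ===== PRECONDITION & SPEC =====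
def Spec_count_hallucinations (text : String) (out : Int) : Prop := out = count_hallucinations_alt text
instance (text : String) (out : Int) : Decidable (Spec_count_hallucinations text out) := by unfold Spec_count_hallucinations; infer_instance

-- ===== CLAIM (what is proved, stated in full; the proofs are below) =====
def Claim_equal_count_hallucinations : Prop := ∀ (text : String), Dom_count_hallucinations text → Spec_count_hallucinations text (count_hallucinations text)

-- ===== LEMMAS AND PROOFS =====

theorem pvRunLen_le (w : String) (l : List String) : pvRunLen w l ≤ l.length := by
  induction l with
  | nil => simp [pvRunLen]
  | cons x xs ih =>
    simp only [pvRunLen, List.length_cons]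
    split <;> omega


theorem pvBLoop_cons (w : String) (ws : List String) (prev : Option String) (run : Nat) (total : Int) :
    pvBLoop (w :: ws) prev run total =
      pvBLoop ws (some w) (if some w = prev then run + 1 else 1)
        (if (if some w = prev then run + 1 else 1) > 5 then total + 1 else total) := rfl

-- the leading pvRunLen-many elements of l are all w, and the next one (if any) is not w
theorem pvRunLen_spec (w : String) (l : List String) :
    l.take (pvRunLen w l) = List.replicate (pvRunLen w l) w ∧
    (match l.drop (pvRunLen w l) with | [] => True | x :: _ => x ≠ w) := by
  induction l with
  | nil => simp [pvRunLen]
  | cons x xs ih =>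
    by_cases h : x = w
    · subst h
      simp only [pvRunLen, beq_self_eq_true, if_true]
      refine ⟨?_, ?_⟩
      · simpa [List.replicate_succ] using ih.1
      · simpa using ih.2
    · have hb : (x == w) = false := by simp [h]
      simp [pvRunLen, hb, h]

-- running B through a block of n copies of w with prev = some w
theorem pvBLoop_replicate (n : Nat) (w : String) (rest : List String) (run : Nat) (total : Int) :
    pvBLoop (List.replicate n w ++ rest) (some w) run total =
      pvBLoop rest (some w) (run + n) (total + ((max (run + n) 5 - max run 5 : Nat) : Int)) := by
  induction n generalizing run total with
  | zero => simp
  | succ m ih =>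
    rw [List.replicate_succ, List.cons_append, pvBLoop_cons, if_pos rfl, ih]
    have h1 : run + 1 + m = run + (m + 1) := by omega
    rw [h1]
    congr 1
    split <;> omega

theorem pvALoop_nil : pvALoop [] = 0 := by unfold pvALoop; rfl

theorem pvALoop_cons (w : String) (rest : List String) :
    pvALoop (w :: rest) =
      (if 1 + pvRunLen w rest > 5 then ((1 + pvRunLen w rest : Nat) : Int) - 5 else 0) +
        pvALoop (rest.drop (pvRunLen w rest)) := by
  rw [pvALoop.eq_def]

-- main invariant: when prev is not the head word, B's remaining loop equals total + A's loop
theorem pvBLoop_eq_pvALoop (n : Nat) :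
    ∀ (l : List String), l.length ≤ n → ∀ (prev : Option String) (run : Nat) (total : Int),
      (match l with | [] => True | w :: _ => some w ≠ prev) →
      pvBLoop l prev run total = total + pvALoop l := by
  induction n with
  | zero =>
    intro l hl prev run total _
    have : l = [] := by cases l <;> simp_all
    subst this; simp [pvBLoop, pvALoop_nil]
  | succ m ih =>
    intro l hl prev run total hprev
    cases l with
    | nil => simp [pvBLoop, pvALoop_nil]
    | cons w rest =>
      have hne : some w ≠ prev := hprev
      set k := pvRunLen w rest with hk
      have hspec := pvRunLen_spec w rest
      have hkle : k ≤ rest.length := pvRunLen_le w rest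
      have hdecomp : rest = List.replicate k w ++ rest.drop k := by
        conv_lhs => rw [← List.take_append_drop k rest]
        rw [hspec.1]
      -- first step of B: run resets to 1, nothing added (1 > 5 is false)
      have hstep : pvBLoop (w :: rest) prev run total =
          pvBLoop rest (some w) 1 total := by
        rw [pvBLoop_cons, if_neg hne]
        norm_num
      rw [hstep]
      conv_lhs => rw [hdecomp]
      rw [pvBLoop_replicate]
      have hnext : (match rest.drop k with | [] => True | x :: _ => some x ≠ some w) := by
        have := hspec.2
        cases h : rest.drop k with
        | nil => trivial
        | cons x xs => rw [← hk] at this; rw [h] at this; simpa using this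
      have hlen : (rest.drop k).length ≤ m := by
        simp only [List.length_cons] at hl
        have := List.length_drop (l := rest) (i := k)
        omega
      rw [ih (rest.drop k) hlen (some w) (1 + k) _ hnext]
      rw [pvALoop_cons, ← hk]
      split <;> omega

-- ===== VERDICT (by name: the statement is the Claim_ definition above) =====
theorem count_hallucinations_spec : Claim_equal_count_hallucinations := by
  intro text _
  unfold Spec_count_hallucinations count_hallucinations count_hallucinations_alt
  set words := PySem.Str.split₀ (PySem.Str.lower text) with hw
  cases h : words with
  | nil => simp [pvBLoop]
  | cons w rest =>
    have := pvBLoop_eq_pvALoop (w :: rest).length (w :: rest) le_rfl none 0 0 (by simp)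
    simp [this]
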